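-- pv_equiv track=rewrite | github.com/fyfmbs/stanCode_Project | boggle_game_solver/anagram.py | find_anagrams_helper
-- ===== SOURCE A (Python) =====
-- def find_anagrams_helper(alphabet_dic, c_s, c_n, word_lst, cnt_lst, word_dic):
--     """
--     a helper for the find_anagrams that can input more info
--     :param word_dic:
--     :param alphabet_dic: the dictionary include every alphabet in the searching word
--     :param c_s: a string for saving the word that we search
--     :param c_n: a list for saving the index of the dictionary
--     :param word_lst: a list for saving the word that I searched
--     :param cnt_lst: the list that saving the using times
--     :return: the word list that we searched
--     """
--     cnt_lst.append(1)
--     if len(c_s) == len(alphabet_dic):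
--         if c_s not in word_lst:
--             word_lst.append(c_s)
--
--     else:
--         for ele in alphabet_dic:
--             if ele not in c_n:
--                 c_n.append(ele)
--                 c_s += alphabet_dic[ele]
--                 if has_prefix(c_s, word_dic) is True:
--                     find_anagrams_helper(alphabet_dic, c_s, c_n, word_lst, cnt_lst, word_dic)
--                     c_n.pop()
--                     c_s = c_s[:len(c_s)-1]
--                 else:
--                     c_n.pop()
--                     c_s = c_s[:len(c_s) - 1]
--     return word_lst
--
-- def has_prefix(sub_s, word_dic):
--     """
--     :param word_dic:
--     :param sub_s: the sub_string with the staring word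
--     :return: True of False
--     """
--     for word in word_dic:
--         if word.startswith(sub_s) is True:
--             return True
--     return False
-- ===== SOURCE B (Python) =====
-- # B: pure recursive generator (choose/extend, unchoose via s = s[:-1]) over an immutable
-- # used-key set, collecting completions as return values in DFS order, then one dedupe fold
-- # into a fresh result list.  Return-value equivalence only: A mutates word_lst/cnt_lst/c_n
-- # in place, B mutates none of its arguments.
--
-- def has_prefix(sub_s, word_dic):
--     return any(word.startswith(sub_s) for word in word_dic)
--
--
-- def find_anagrams_helper(alphabet_dic, c_s, c_n, word_lst, cnt_lst, word_dic):
--     def complete(s, used):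
--         if len(s) == len(alphabet_dic):
--             return [s]
--         out = []
--         for k in alphabet_dic:
--             if k not in used:
--                 s += alphabet_dic[k]
--                 if has_prefix(s, word_dic):
--                     out.extend(complete(s, used | {k}))
--                 s = s[:-1]
--         return out
--
--     result = list(word_lst)
--     for w in complete(c_s, frozenset(c_n)):
--         if w not in result:
--             result.append(w)
--     return result
-- ===== Notes on version B (the rewrite author's own statement) =====
-- stated objective: simpler
-- what changed: Replaces A's backtracking that mutates shared word_lst/cnt_lst/c_n accumulators and dedupes at discovery time with a pure recursive generator returning the completion list (choose/unchoose over an immutable used-key set, has_prefix via any()), followed by a single dedupe fold into a fresh result list; return value is identical, argument mutation is dropped.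
import Mathlib
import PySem

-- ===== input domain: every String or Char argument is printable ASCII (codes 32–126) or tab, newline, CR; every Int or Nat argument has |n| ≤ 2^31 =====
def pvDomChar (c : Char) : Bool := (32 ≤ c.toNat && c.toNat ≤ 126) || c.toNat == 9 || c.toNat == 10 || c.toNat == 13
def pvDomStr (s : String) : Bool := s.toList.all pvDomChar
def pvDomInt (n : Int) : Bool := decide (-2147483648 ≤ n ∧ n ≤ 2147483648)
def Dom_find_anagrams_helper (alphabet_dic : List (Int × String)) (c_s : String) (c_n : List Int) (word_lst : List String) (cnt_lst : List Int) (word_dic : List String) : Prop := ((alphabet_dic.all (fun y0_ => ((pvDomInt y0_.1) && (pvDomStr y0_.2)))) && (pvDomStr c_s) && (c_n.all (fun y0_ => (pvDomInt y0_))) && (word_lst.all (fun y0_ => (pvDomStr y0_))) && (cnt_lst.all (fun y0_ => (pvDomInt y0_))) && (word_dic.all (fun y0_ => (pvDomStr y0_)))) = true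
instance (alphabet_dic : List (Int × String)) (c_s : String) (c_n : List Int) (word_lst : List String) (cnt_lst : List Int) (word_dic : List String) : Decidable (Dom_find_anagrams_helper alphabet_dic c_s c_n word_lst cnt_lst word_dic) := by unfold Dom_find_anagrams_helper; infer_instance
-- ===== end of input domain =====

-- B replaces A's accumulator-mutating backtracking with a pure recursive generator of the
-- completions (choose/unchoose on an immutable used-set) plus one final dedupe fold; simpler
-- decomposition, same cost.  Equivalence is about the RETURN value only: Python A mutates
-- word_lst/cnt_lst/c_n in place, Python B mutates none of its arguments.
-- Both ports carry a fuel argument (keys+1, a totality guard only: the recursion depth is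
-- bounded by the number of distinct keys, so fuel never runs out on any input).

-- ===== PORT A =====
-- A's has_prefix: explicit loop with early return True
def hasPrefixA (sub_s : String) (word_dic : List String) : Bool :=
  match word_dic with
  | [] => false
  | word :: rest =>
    if PySem.Str.startswith word sub_s then true else hasPrefixA sub_s rest

-- A's for-loop over the dict keys; `go` is the recursive call of the helper one level down.
-- Python restores c_n exactly (append/pop) but truncates c_s by ONE character (c_s[:len-1]),
-- so the loop threads the truncated c_s; word_lst/cnt_lst thread through as state.
def loopA (dic : PySem.Dict Int String) (wd : List String)
    (go : String → List Int → List String → List Int → List String × List Int)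
    (ks : List Int) (c_s : String) (c_n : List Int) (wl : List String) (cl : List Int) :
    List String × List Int :=
  match ks with
  | [] => (wl, cl)
  | ele :: rest =>
    if c_n.contains ele then loopA dic wd go rest c_s c_n wl cl
    else
      let t := c_s ++ PySem.Dict.getD dic ele ""
      if hasPrefixA t wd then
        let r := go t (c_n ++ [ele]) wl cl
        loopA dic wd go rest (PySem.Str.slice t none (some ((PySem.Str.len t : Int) - 1))) c_n r.1 r.2
      else
        loopA dic wd go rest (PySem.Str.slice t none (some ((PySem.Str.len t : Int) - 1))) c_n wl cl

def goA (dic : PySem.Dict Int String) (wd : List String) :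
    Nat → String → List Int → List String → List Int → List String × List Int
  | 0, _, _, wl, cl => (wl, cl)
  | fuel + 1, c_s, c_n, wl, cl =>
    let cl' := cl ++ [1]
    if PySem.Str.len c_s = PySem.Dict.size dic then
      (if wl.contains c_s then wl else wl ++ [c_s], cl')
    else
      loopA dic wd (fun s n w c => goA dic wd fuel s n w c) (PySem.Dict.keys dic) c_s c_n wl cl'

def find_anagrams_helper (alphabet_dic : List (Int × String)) (c_s : String) (c_n : List Int) (word_lst : List String) (cnt_lst : List Int) (word_dic : List String) : List String :=
  let dic := PySem.Dict.ofList alphabet_dic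
  (goA dic word_dic ((PySem.Dict.keys dic).length + 1) c_s c_n word_lst cnt_lst).1

-- ===== PORT B =====
-- B's has_prefix: any(...)
def hasPrefixB (sub_s : String) (word_dic : List String) : Bool :=
  word_dic.any (fun word => PySem.Str.startswith word sub_s)

-- B's inner for-loop: concatenates child completion lists; `gen` is complete one level down
def loopB (dic : PySem.Dict Int String) (wd : List String)
    (gen : String → PySem.Set Int → List String)
    (ks : List Int) (s : String) (used : PySem.Set Int) : List String :=
  match ks with
  | [] => []
  | k :: rest =>
    if PySem.Set.contains used k then loopB dic wd gen rest s used
    else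
      let t := s ++ PySem.Dict.getD dic k ""
      (if hasPrefixB t wd then gen t (PySem.Set.add used k) else [])
        ++ loopB dic wd gen rest (PySem.Str.slice t none (some (-1))) used

-- B's complete: pure DFS generator of the completions, in discovery order
def genB (dic : PySem.Dict Int String) (wd : List String) :
    Nat → String → PySem.Set Int → List String
  | 0, _, _ => []
  | fuel + 1, s, used =>
    if PySem.Str.len s = PySem.Dict.size dic then [s]
    else loopB dic wd (fun s' u => genB dic wd fuel s' u) (PySem.Dict.keys dic) s used

def find_anagrams_helper_alt (alphabet_dic : List (Int × String)) (c_s : String) (c_n : List Int) (word_lst : List String) (cnt_lst : List Int) (word_dic : List String) : List String :=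
  let dic := PySem.Dict.ofList alphabet_dic
  (genB dic word_dic ((PySem.Dict.keys dic).length + 1) c_s (PySem.Set.ofList c_n)).foldl
    (fun acc w => if acc.contains w then acc else acc ++ [w]) word_lst

-- ===== PRECONDITION & SPEC =====
def Spec_find_anagrams_helper (alphabet_dic : List (Int × String)) (c_s : String) (c_n : List Int) (word_lst : List String) (cnt_lst : List Int) (word_dic : List String) (out : List String) : Prop := out = find_anagrams_helper_alt alphabet_dic c_s c_n word_lst cnt_lst word_dic
instance (alphabet_dic : List (Int × String)) (c_s : String) (c_n : List Int) (word_lst : List String) (cnt_lst : List Int) (word_dic : List String) (out : List String) : Decidable (Spec_find_anagrams_helper alphabet_dic c_s c_n word_lst cnt_lst word_dic out) := by unfold Spec_find_anagrams_helper; infer_instance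

-- ===== CLAIM (what is proved, stated in full; the proofs are below) =====
def Claim_equal_find_anagrams_helper : Prop := ∀ (alphabet_dic : List (Int × String)) (c_s : String) (c_n : List Int) (word_lst : List String) (cnt_lst : List Int) (word_dic : List String), Dom_find_anagrams_helper alphabet_dic c_s c_n word_lst cnt_lst word_dic → Spec_find_anagrams_helper alphabet_dic c_s c_n word_lst cnt_lst word_dic (find_anagrams_helper alphabet_dic c_s c_n word_lst cnt_lst word_dic)

-- ===== LEMMAS AND PROOFS =====

-- the two has_prefix variants agree
lemma hasPrefix_eq (wd : List String) (s : String) : hasPrefixA s wd = hasPrefixB s wd := by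
  induction wd with
  | nil => rfl
  | cons w rest ih =>
    simp only [hasPrefixA, hasPrefixB, List.any_cons]
    cases h : PySem.Str.startswith w s <;> simp [ih, hasPrefixB]

-- A's t[:len(t)-1] is B's t[:-1]
lemma slice_len_sub_one {α : Type} (xs : List α) :
    PySem.List.slice xs none (some ((xs.length : Int) - 1)) = xs.dropLast := by
  cases xs with
  | nil => rfl
  | cons x xs' =>
    have h : ((x :: xs').length : Int) - 1 = ((xs'.length : Nat) : Int) := by simp
    rw [h, PySem.List.slice_to_natCast, List.dropLast_eq_take]
    simp

lemma strTrunc_eq (t : String) :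
    PySem.Str.slice t none (some ((PySem.Str.len t : Int) - 1)) = PySem.Str.slice t none (some (-1)) := by
  apply String.toList_inj.mp
  simp only [PySem.Str.toList_slice, PySem.Chars.slice_eq_listSlice, PySem.Str.len_eq]
  rw [slice_len_sub_one, PySem.List.slice_to_neg_one]

-- membership in set(c_n) is membership in c_n
lemma set_contains_ofList (l : List Int) (k : Int) :
    PySem.Set.contains (PySem.Set.ofList l) k = l.contains k := by
  by_cases h : k ∈ l <;> simp [h, PySem.Set.mem_ofList]

-- set(c_n + [k]) is set(c_n) | {k}
lemma ofList_append_singleton (l : List Int) (k : Int) :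
    PySem.Set.ofList (l ++ [k]) = PySem.Set.add (PySem.Set.ofList l) k := by
  simp [PySem.Set.ofList_eq_foldl, List.foldl_append]

-- main invariant: A's word_lst is B's completions dedupe-folded into word_lst
lemma goA_eq_genB (dic : PySem.Dict Int String) (wd : List String) :
    ∀ (fuel : Nat) (c_s : String) (c_n : List Int) (wl : List String) (cl : List Int),
      (goA dic wd fuel c_s c_n wl cl).1
        = (genB dic wd fuel c_s (PySem.Set.ofList c_n)).foldl
            (fun acc w => if acc.contains w then acc else acc ++ [w]) wl := by
  intro fuel
  induction fuel with
  | zero => intro c_s c_n wl cl; simp [goA, genB]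
  | succ n ih =>
    have hloop : ∀ (ks : List Int) (c_s : String) (c_n : List Int) (wl : List String) (cl : List Int),
        (loopA dic wd (fun s m w c => goA dic wd n s m w c) ks c_s c_n wl cl).1
          = (loopB dic wd (fun s' u => genB dic wd n s' u) ks c_s (PySem.Set.ofList c_n)).foldl
              (fun acc w => if acc.contains w then acc else acc ++ [w]) wl := by
      intro ks
      induction ks with
      | nil => intro c_s c_n wl cl; simp [loopA, loopB]
      | cons k rest ihk =>
        intro c_s c_n wl cl
        simp only [loopA, loopB, set_contains_ofList]
        by_cases hk : c_n.contains k = true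
        · rw [if_pos hk, if_pos hk]
          exact ihk c_s c_n wl cl
        · rw [if_neg hk, if_neg hk, ← hasPrefix_eq]
          by_cases hp : hasPrefixA (c_s ++ PySem.Dict.getD dic k "") wd = true
          · rw [if_pos hp, if_pos hp, ihk, ih, ofList_append_singleton, strTrunc_eq,
              List.foldl_append]
          · rw [if_neg hp, if_neg hp, List.nil_append, ihk, strTrunc_eq]
    intro c_s c_n wl cl
    simp only [goA, genB]
    by_cases hlen : PySem.Str.len c_s = (PySem.Dict.size dic : Int)
    · rw [if_pos hlen, if_pos hlen]
      rfl
    · rw [if_neg hlen, if_neg hlen]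
      exact hloop (PySem.Dict.keys dic) c_s c_n wl (cl ++ [1])

-- ===== VERDICT (by name: the statement is the Claim_ definition above) =====
theorem find_anagrams_helper_spec : Claim_equal_find_anagrams_helper := by
  intro alphabet_dic c_s c_n word_lst cnt_lst word_dic _hdom
  show find_anagrams_helper alphabet_dic c_s c_n word_lst cnt_lst word_dic
      = find_anagrams_helper_alt alphabet_dic c_s c_n word_lst cnt_lst word_dic
  simp only [find_anagrams_helper, find_anagrams_helper_alt]
  exact goA_eq_genB _ _ _ _ _ _ _
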